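-- pv_equiv track=rewrite | github.com/CTStudyGroup/BOJ | _youn/boj_2253.py | solve
-- ===== SOURCE A (Python) =====
-- from collections import defaultdict
--
-- def solve(N, banned):
--     dp = defaultdict(dict)
--     dp[2][1] = 1
--
--     for i in range(2, N+1):
--         if i in banned or i not in dp: continue
--
--         for j in dp[i]:
--             for nj in [j-1, j, j+1]:
--                 if nj <=0: continue
--                 ni = i + nj
--                 if ni in banned or ni > N: continue
--                 if nj not in dp[ni] or dp[ni][nj] > dp[i][j] + 1:
--                     dp[ni][nj] = dp[i][j] + 1
--     return min(dp[N].values()) if N in dp else -1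
-- ===== SOURCE B (Python) =====
-- def solve(N, banned):
--     # Pull-based DP: each state (position i, last jump j) is computed once as
--     # 1 + min over its (at most 3) predecessor states, scanning only the
--     # triangle of feasible jump sizes; banned is looked up in a set.
--     # hi = highest position holding any state: rows whose whole predecessor
--     # window lies beyond hi are unreachable and skipped.
--     bs = set(banned)
--     tbl = {(2, 1): 1}
--     jmax = 1
--     hi = 2
--     for i in range(3, N + 1):
--         if (jmax + 1) * (jmax + 2) // 2 + 1 <= i:
--             jmax += 1
--         if i in bs or i - jmax > hi:
--             continue
--         for j in range(1, jmax + 1):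
--             p = i - j
--             if p < 2 or p in bs:
--                 continue
--             best = None
--             for q in (j - 1, j, j + 1):
--                 v = tbl.get((p, q))
--                 if v is not None and (best is None or v < best):
--                     best = v
--             if best is not None:
--                 tbl[(i, j)] = best + 1
--                 hi = i
--     best = None
--     for j in range(1, jmax + 1):
--         v = tbl.get((N, j))
--         if v is not None and (best is None or v < best):
--             best = v
--     return best if best is not None else -1
-- ===== Notes on version B (the rewrite author's own statement) =====
-- stated objective: faster
-- what changed: A's forward multi-relaxation DP over a defaultdict-of-dicts (which re-scans the banned LIST on every generated edge and repeatedly min-updates target cells) is replaced by a pull-style DP over a flat (position, jump) dict: each state is written exactly once as 1 + min of its at most 3 predecessor states, the inner loop runs only over the triangle of feasible jump sizes (maintained incrementally), and banned is held in a set.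
import Mathlib
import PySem

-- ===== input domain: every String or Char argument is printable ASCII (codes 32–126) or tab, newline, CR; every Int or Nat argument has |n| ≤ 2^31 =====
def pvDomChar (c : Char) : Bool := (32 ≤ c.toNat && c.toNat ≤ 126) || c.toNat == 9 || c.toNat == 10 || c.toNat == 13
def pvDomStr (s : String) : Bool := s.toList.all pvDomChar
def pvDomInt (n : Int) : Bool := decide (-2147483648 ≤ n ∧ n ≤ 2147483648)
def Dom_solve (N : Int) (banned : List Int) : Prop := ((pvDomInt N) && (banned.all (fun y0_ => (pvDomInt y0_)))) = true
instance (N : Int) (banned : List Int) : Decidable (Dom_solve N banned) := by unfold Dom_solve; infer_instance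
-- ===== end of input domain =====

-- B replaces A's forward multi-relaxation DP over a dict-of-dicts (whose inner loops
-- scan the banned LIST on every edge) by a pull-style DP over a flat (position, jump)
-- dict — each state is written once as 1 + min of its ≤ 3 predecessors, scanning only
-- the triangle of feasible jump sizes — with banned held in a set; same return value.

-- ===== PORT A =====
def solve (N : Int) (banned : List Int) : Int :=
  -- dp = defaultdict(dict); dp[2][1] = 1
  let dp0 : PySem.Dict Int (PySem.Dict Int Int) :=
    (PySem.Dict.empty).insert 2 ((PySem.Dict.empty).insert 1 1)
  let dp := (PySem.List.pyRange 2 (N+1) 1).foldl (fun dp i =>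
      if banned.contains i || !(dp.contains i) then dp
      else
        ((dp.getD i PySem.Dict.empty).keys).foldl (fun dp j =>
          ([j-1, j, j+1] : List Int).foldl (fun dp nj =>
            if nj ≤ 0 then dp
            else
              let ni := i + nj
              if banned.contains ni || decide (N < ni) then dp
              else
                -- dp[i][j] read with a default: j is a key of dp[i] here
                let cand := (dp.getD i PySem.Dict.empty).getD j 0 + 1
                match (dp.getD ni PySem.Dict.empty).get? nj with
                | none => dp.insert ni ((dp.getD ni PySem.Dict.empty).insert nj cand)
                | some old =>
                    if cand < old then dp.insert ni ((dp.getD ni PySem.Dict.empty).insert nj cand)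
                    else dp
          ) dp
        ) dp
    ) dp0
  if dp.contains N then
    -- min(dp[N].values()); dp[N] is nonempty whenever N is a key, so min never raises
    match PySem.List.min? ((dp.getD N PySem.Dict.empty).values) (fun v => v) with
    | some v => v
    | none => 0
  else -1

-- ===== PORT B =====
def solve_alt (N : Int) (banned : List Int) : Int :=
  let bs : PySem.Set Int := PySem.Set.ofList banned
  let st := (PySem.List.pyRange 3 (N+1) 1).foldl
    (fun (st : PySem.Dict (Int × Int) Int × Int × Int) i =>
      let tbl := st.1
      let jmax := if PySem.Int.floordiv ((st.2.1+1)*(st.2.1+2)) 2 + 1 ≤ i then st.2.1 + 1 else st.2.1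
      let hi := st.2.2
      if bs.contains i || decide (st.2.2 < i - jmax) then (tbl, jmax, hi)
      else
        let res := (PySem.List.pyRange 1 (jmax+1) 1).foldl
          (fun (acc : PySem.Dict (Int × Int) Int × Int) j =>
            let tbl := acc.1
            let p := i - j
            if p < 2 || bs.contains p then acc
            else
              let best := ([j-1, j, j+1] : List Int).foldl (fun best q =>
                  match tbl.get? (p, q) with
                  | none => best
                  | some v => match best with
                    | none => some v
                    | some b => if v < b then some v else best) none
              match best with
              | none => acc
              | some b => (tbl.insert (i, j) (b + 1), i)) (tbl, hi)
        (res.1, jmax, res.2))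
    ((PySem.Dict.empty.insert ((2 : Int), (1 : Int)) (1 : Int)), 1, 2)
  let best := (PySem.List.pyRange 1 (st.2.1+1) 1).foldl (fun best j =>
      match st.1.get? (N, j) with
      | none => best
      | some v => match best with
        | none => some v
        | some b => if v < b then some v else best) none
  match best with
  | none => -1
  | some b => b

-- ===== PRECONDITION & SPEC =====
def Spec_solve (N : Int) (banned : List Int) (out : Int) : Prop := out = solve_alt N banned
instance (N : Int) (banned : List Int) (out : Int) : Decidable (Spec_solve N banned out) := by unfold Spec_solve; infer_instance

-- ===== CLAIM (what is proved, stated in full; the proofs are below) =====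
def Claim_equal_solve : Prop := ∀ (N : Int) (banned : List Int), Dom_solve N banned → Spec_solve N banned (solve N banned)

-- ===== LEMMAS AND PROOFS =====

/-- `min(x, y)` on two optional candidates (`none` = no candidate). -/
def optMin : Option Int → Option Int → Option Int
  | none, b => b
  | some x, none => some x
  | some x, some y => some (min x y)

/-- The shared recurrence: minimal number of jumps ending at stone `i` with last
jump `j` (cost of the seed state (2,1) is 1, as in A). -/
def fS (B : List Int) (i j : Int) : Option Int :=
  if i ≤ 2 then (if i = 2 ∧ j = 1 then some 1 else none)
  else if h : 1 ≤ j ∧ B.contains i = false ∧ 2 ≤ i - j ∧ B.contains (i - j) = false then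
    (optMin (optMin (fS B (i-j) (j-1)) (fS B (i-j) j)) (fS B (i-j) (j+1))).map (· + 1)
  else none
termination_by (i - 2).toNat
decreasing_by all_goals omega

def min3 (B : List Int) (p j : Int) : Option Int :=
  optMin (optMin (fS B p (j-1)) (fS B p j)) (fS B p (j+1))

lemma fS_def (B : List Int) (i j : Int) : fS B i j =
    if i ≤ 2 then (if i = 2 ∧ j = 1 then some 1 else none)
    else if 1 ≤ j ∧ B.contains i = false ∧ 2 ≤ i - j ∧ B.contains (i - j) = false then
      (min3 B (i-j) j).map (· + 1)
    else none := by
  rw [fS, min3]; split_ifs <;> rfl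

lemma fS_seed (B : List Int) : fS B 2 1 = some 1 := by
  rw [fS_def]; norm_num

lemma fS_two (B : List Int) (j : Int) (h : j ≠ 1) : fS B 2 j = none := by
  rw [fS_def]; simp [h]

lemma fS_some_pos (B : List Int) (i j v : Int) (h : fS B i j = some v) : 1 ≤ j ∧ 2 ≤ i := by
  rw [fS_def] at h
  split_ifs at h with h1 h2 h3
  · omega
  · exact ⟨h3.1, by omega⟩




-- ---------- minimum-of-a-set characterisation ----------

def IsMinOf (o : Option Int) (P : Int → Prop) : Prop :=
  match o with
  | none => ∀ v, ¬ P v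
  | some v => P v ∧ ∀ w, P w → v ≤ w

lemma IsMinOf.unique {o o' : Option Int} {P : Int → Prop}
    (h : IsMinOf o P) (h' : IsMinOf o' P) : o = o' := by
  cases o with
  | none => cases o' with
    | none => rfl
    | some w => exact absurd h'.1 (h w)
  | some v => cases o' with
    | none => exact absurd h.1 (h' v)
    | some w => simp only [IsMinOf] at h h'
                exact congrArg some (le_antisymm (h.2 w h'.1) (h'.2 v h.1))

lemma IsMinOf.congr {o : Option Int} {P Q : Int → Prop}
    (hPQ : ∀ v, P v ↔ Q v) (h : IsMinOf o P) : IsMinOf o Q := by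
  cases o with
  | none => exact fun v hv => h v ((hPQ v).mpr hv)
  | some v => exact ⟨(hPQ v).mp h.1, fun w hw => h.2 w ((hPQ w).mpr hw)⟩

lemma isMinOf_self (o : Option Int) : IsMinOf o (fun v => o = some v) := by
  cases o with
  | none => intro v h; simp at h
  | some v => exact ⟨rfl, fun w hw => le_of_eq (Option.some.inj hw)⟩

lemma isMinOf_optMin {a b : Option Int} {P Q : Int → Prop}
    (ha : IsMinOf a P) (hb : IsMinOf b Q) : IsMinOf (optMin a b) (fun v => P v ∨ Q v) := by
  cases a with
  | none => cases b with
    | none => exact fun v hv => hv.elim (ha v) (hb v)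
    | some y => exact ⟨Or.inr hb.1, fun w hw => hw.elim (fun h => absurd h (ha w)) (hb.2 w)⟩
  | some x => cases b with
    | none => exact ⟨Or.inl ha.1, fun w hw => hw.elim (ha.2 w) (fun h => absurd h (hb w))⟩
    | some y =>
        show IsMinOf (some (min x y)) _
        refine ⟨?_, ?_⟩
        · rcases le_total x y with h | h
          · rw [min_eq_left h]; exact Or.inl ha.1
          · rw [min_eq_right h]; exact Or.inr hb.1
        · intro w hw
          rcases hw with h | h
          · exact le_trans (min_le_left x y) (ha.2 w h)
          · exact le_trans (min_le_right x y) (hb.2 w h)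

lemma isMinOf_map_add {o : Option Int} {P : Int → Prop}
    (h : IsMinOf o P) : IsMinOf (o.map (· + 1)) (fun v => P (v - 1)) := by
  cases o with
  | none => exact fun v hv => h (v-1) hv
  | some v =>
      show IsMinOf (some (v + 1)) _
      constructor
      · have e : v + 1 - 1 = v := by omega
        simpa [e] using h.1
      · intro w hw
        have := h.2 (w - 1) hw
        omega

lemma isMinOf_foldl {α : Type} (g : α → Option Int) (l : List α) (acc : Option Int)
    (P : Int → Prop) (h : IsMinOf acc P) :
    IsMinOf (l.foldl (fun a x => optMin a (g x)) acc)
      (fun v => P v ∨ ∃ x ∈ l, g x = some v) := by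
  induction l generalizing acc P with
  | nil => simpa using h
  | cons x xs ih =>
      have h1 : IsMinOf (optMin acc (g x)) (fun v => P v ∨ g x = some v) :=
        isMinOf_optMin h (isMinOf_self (g x))
      have h2 := ih (optMin acc (g x)) _ h1
      refine IsMinOf.congr (fun v => ?_) h2
      simp only [List.mem_cons]
      constructor
      · rintro (⟨h | h⟩ | ⟨y, hy, hg⟩)
        · exact Or.inl h
        · exact Or.inr ⟨x, Or.inl rfl, h⟩
        · exact Or.inr ⟨y, Or.inr hy, hg⟩
      · rintro (h | ⟨y, (rfl | hy), hg⟩)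
        · exact Or.inl (Or.inl h)
        · exact Or.inl (Or.inr hg)
        · exact Or.inr ⟨y, hy, hg⟩

lemma isMinOf_min3 (B : List Int) (p j : Int) :
    IsMinOf (min3 B p j) (fun v => ∃ q, (q = j-1 ∨ q = j ∨ q = j+1) ∧ fS B p q = some v) := by
  have hbig := isMinOf_optMin (isMinOf_optMin (isMinOf_self (fS B p (j-1))) (isMinOf_self (fS B p j)))
    (isMinOf_self (fS B p (j+1)))
  refine IsMinOf.congr (fun v => ?_) hbig
  constructor
  · rintro ((h | h) | h)
    exacts [⟨j-1, Or.inl rfl, h⟩, ⟨j, Or.inr (Or.inl rfl), h⟩, ⟨j+1, Or.inr (Or.inr rfl), h⟩]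
  · rintro ⟨q, (rfl | rfl | rfl), h⟩
    exacts [Or.inl (Or.inl h), Or.inl (Or.inr h), Or.inr h]

/-- The 3-way `match` step in both ports is `optMin`. -/
lemma matchStep_eq (best o : Option Int) :
    (match o with
     | none => best
     | some v => match best with
       | none => some v
       | some b => if v < b then some v else best) = optMin best o := by
  cases o with
  | none => cases best <;> rfl
  | some v => cases best with
    | none => rfl
    | some b => simp only [optMin]; split_ifs with h <;> simp [min_def] <;> omega

/-- Triangle bound: a state with last jump `j` lives at position ≥ j(j+1)/2 + 1. -/
lemma fS_tri_aux (B : List Int) : ∀ n : Nat, ∀ i j v : Int, (i-2).toNat ≤ n →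
    fS B i j = some v → j*(j+1) + 2 ≤ 2*i := by
  intro n
  induction n with
  | zero =>
      intro i j v hn h
      rw [fS_def] at h
      split_ifs at h with h1 h2 h3
      · rcases h2 with ⟨rfl, rfl⟩; norm_num
      · omega
  | succ n ih =>
      intro i j v hn h
      rw [fS_def] at h
      split_ifs at h with h1 h2 h3
      · rcases h2 with ⟨rfl, rfl⟩; norm_num
      · cases hm : min3 B (i-j) j with
        | none => rw [hm] at h; simp at h
        | some a =>
            have hP := isMinOf_min3 B (i-j) j
            rw [hm] at hP
            obtain ⟨q, hq, hfq⟩ := hP.1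
            have hrec : (i - j - 2).toNat ≤ n := by omega
            have hb := ih (i-j) q a hrec hfq
            have hj : 1 ≤ j := h3.1
            rcases hq with hq | hq | hq <;> rw [hq] at hb
            · have e : j*(j+1) = (j-1)*((j-1)+1) + 2*j := by ring
              linarith
            · linarith
            · have e : (j+1)*((j+1)+1) = j*(j+1) + 2*(j+1) := by ring
              linarith

lemma fS_tri (B : List Int) (i j v : Int) (h : fS B i j = some v) :
    j*(j+1) + 2 ≤ 2*i :=
  fS_tri_aux B (i-2).toNat i j v le_rfl h

-- ---------- A side ----------

def cellA (d : PySem.Dict Int (PySem.Dict Int Int)) (i j : Int) : Option Int :=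
  (d.getD i PySem.Dict.empty).get? j

def dpA0 : PySem.Dict Int (PySem.Dict Int Int) :=
  (PySem.Dict.empty).insert 2 ((PySem.Dict.empty).insert 1 1)

def stepA (N : Int) (banned : List Int) (dp : PySem.Dict Int (PySem.Dict Int Int)) (i : Int) :
    PySem.Dict Int (PySem.Dict Int Int) :=
  if banned.contains i || !(dp.contains i) then dp
  else
    ((dp.getD i PySem.Dict.empty).keys).foldl (fun dp j =>
      ([j-1, j, j+1] : List Int).foldl (fun dp nj =>
        if nj ≤ 0 then dp
        else
          let ni := i + nj
          if banned.contains ni || decide (N < ni) then dp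
          else
            let cand := (dp.getD i PySem.Dict.empty).getD j 0 + 1
            match (dp.getD ni PySem.Dict.empty).get? nj with
            | none => dp.insert ni ((dp.getD ni PySem.Dict.empty).insert nj cand)
            | some old =>
                if cand < old then dp.insert ni ((dp.getD ni PySem.Dict.empty).insert nj cand)
                else dp
      ) dp
    ) dp

def relax (N : Int) (B : List Int) (k i j : Int) : Option Int :=
  if i = 2 ∧ j = 1 then some 1
  else if 1 ≤ j ∧ i ≤ N ∧ B.contains i = false ∧ 2 ≤ i - j ∧ i - j ≤ k ∧ B.contains (i-j) = false
  then (min3 B (i-j) j).map (· + 1) else none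

lemma relax_eq_fS (N : Int) (B : List Int) (k i j : Int) (hik : i ≤ k + 1) (hiN : i ≤ N) :
    relax N B k i j = fS B i j := by
  unfold relax
  rw [fS_def]
  by_cases hs : i = 2 ∧ j = 1
  · rcases hs with ⟨rfl, rfl⟩; norm_num
  · rw [if_neg hs]
    by_cases h2 : i ≤ 2
    · rw [if_pos h2, if_neg hs]
      rw [if_neg]
      rintro ⟨hj, -, -, hp, -, -⟩
      omega
    · rw [if_neg h2]
      have hiff : (1 ≤ j ∧ i ≤ N ∧ B.contains i = false ∧ 2 ≤ i - j ∧ i - j ≤ k ∧ B.contains (i-j) = false)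
          ↔ (1 ≤ j ∧ B.contains i = false ∧ 2 ≤ i - j ∧ B.contains (i - j) = false) := by
        constructor
        · rintro ⟨a, b, c, d, e, f⟩; exact ⟨a, c, d, f⟩
        · rintro ⟨a, c, d, f⟩; exact ⟨a, hiN, c, d, by omega, f⟩
      rw [if_congr hiff rfl rfl]

/-- structural well-formedness of A's dict-of-dicts: no empty inner dict, inner keys unique. -/
def Wf2 (d : PySem.Dict Int (PySem.Dict Int Int)) : Prop :=
  ∀ a ma, d.get? a = some ma → (∃ b, ma.get? b ≠ none) ∧ ma.keys.Nodup

def InvA (N : Int) (B : List Int) (k : Int) (d : PySem.Dict Int (PySem.Dict Int Int)) : Prop :=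
  (∀ i j, cellA d i j = relax N B k i j) ∧ Wf2 d

lemma invA_base (N : Int) (B : List Int) : InvA N B 1 dpA0 := by
  constructor
  · intro i j
    unfold cellA dpA0 relax
    rw [PySem.Dict.getD_insert]
    have hrel : ¬(1 ≤ j ∧ i ≤ N ∧ B.contains i = false ∧ 2 ≤ i - j ∧ i - j ≤ 1 ∧ B.contains (i-j) = false) := by
      rintro ⟨-, -, -, h4, h5, -⟩; omega
    by_cases hs : i = 2 ∧ j = 1
    · rcases hs with ⟨rfl, rfl⟩
      rw [if_pos (show (2:Int) = 2 ∧ (1:Int) = 1 from ⟨rfl, rfl⟩)]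
      exact PySem.Dict.get?_insert_self PySem.Dict.empty 1 1
    · rw [if_neg hs, if_neg hrel]
      by_cases hi : i = 2
      · subst hi
        rw [if_pos rfl, PySem.Dict.get?_insert]
        have hj : j ≠ 1 := fun h => hs ⟨rfl, h⟩
        rw [if_neg hj, PySem.Dict.get?_empty]
      · rw [if_neg hi, PySem.Dict.getD_empty, PySem.Dict.get?_empty]
  · intro i m hm
    unfold dpA0 at hm
    rw [PySem.Dict.get?_insert] at hm
    by_cases hi : i = 2
    · rw [if_pos hi] at hm
      have hm' : m = PySem.Dict.empty.insert 1 1 := (Option.some.inj hm).symm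
      subst hm'
      refine ⟨⟨1, ?_⟩, ?_⟩ <;> decide
    · rw [if_neg hi, PySem.Dict.get?_empty] at hm
      simp at hm


/-- one inner-most update of A (definitionally the body of `stepA`'s nj-loop). -/
def updA (N : Int) (B : List Int) (i j : Int) (dp : PySem.Dict Int (PySem.Dict Int Int))
    (nj : Int) : PySem.Dict Int (PySem.Dict Int Int) :=
  if nj ≤ 0 then dp
  else
    let ni := i + nj
    if B.contains ni || decide (N < ni) then dp
    else
      let cand := (dp.getD i PySem.Dict.empty).getD j 0 + 1
      match (dp.getD ni PySem.Dict.empty).get? nj with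
      | none => dp.insert ni ((dp.getD ni PySem.Dict.empty).insert nj cand)
      | some old =>
          if cand < old then dp.insert ni ((dp.getD ni PySem.Dict.empty).insert nj cand)
          else dp

lemma stepA_eq (N : Int) (B : List Int) (d : PySem.Dict Int (PySem.Dict Int Int)) (i : Int) :
    stepA N B d i =
      if B.contains i || !(d.contains i) then d
      else ((d.getD i PySem.Dict.empty).keys).foldl
        (fun dp j => ([j-1, j, j+1] : List Int).foldl (updA N B i j) dp) d := rfl

lemma updA_cells (N : Int) (B : List Int) (i j w : Int)
    (d : PySem.Dict Int (PySem.Dict Int Int)) (m : PySem.Dict Int Int)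
    (hm : d.get? i = some m) (hw : m.getD j 0 = w) (hC : Wf2 d) (nj : Int) :
    (updA N B i j d nj).get? i = some m ∧ Wf2 (updA N B i j d nj) ∧
    (∀ a b : Int, cellA (updA N B i j d nj) a b =
      if a = i + nj ∧ b = nj ∧ 1 ≤ nj ∧ a ≤ N ∧ B.contains a = false
      then optMin (cellA d a b) (some (w + 1)) else cellA d a b) := by
  have hdm : d.getD i PySem.Dict.empty = m := by
    rw [PySem.Dict.getD_eq_get?_getD, hm]; rfl
  unfold updA
  by_cases hnj : nj ≤ 0
  · rw [if_pos hnj]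
    refine ⟨hm, hC, fun a b => ?_⟩
    rw [if_neg]; rintro ⟨-, -, h, -⟩; omega
  · rw [if_neg hnj]
    simp only []
    by_cases hgd : B.contains (i + nj) = true ∨ N < i + nj
    · have hg : (B.contains (i + nj) || decide (N < i + nj)) = true := by
        rcases hgd with h | h
        · rw [h]; rfl
        · rw [decide_eq_true h, Bool.or_true]
      rw [if_pos hg]
      refine ⟨hm, hC, fun a b => ?_⟩
      rw [if_neg]
      rintro ⟨rfl, -, -, hN, hB⟩
      rcases hgd with h | h
      · rw [h] at hB; simp at hB
      · omega
    · push_neg at hgd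
      obtain ⟨hnb', hle⟩ := hgd
      have hnb : B.contains (i + nj) = false := by simpa using hnb'
      have hg : (B.contains (i + nj) || decide (N < i + nj)) = false := by
        rw [hnb, decide_eq_false (by omega : ¬ (N < i + nj))]; rfl
      rw [if_neg (by rw [hg]; simp)]
      have hni : i ≠ i + nj := by omega
      have hcand : (d.getD i PySem.Dict.empty).getD j 0 + 1 = w + 1 := by rw [hdm, hw]
      have hnodup : (d.getD (i+nj) PySem.Dict.empty).keys.Nodup := by
        rw [PySem.Dict.getD_eq_get?_getD]
        cases hx : d.get? (i+nj) with
        | none => exact PySem.Dict.nodup_keys_empty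
        | some m0 => exact (hC (i+nj) m0 hx).2
      have hins : ∀ a b : Int,
          cellA (d.insert (i+nj) ((d.getD (i+nj) PySem.Dict.empty).insert nj
              ((d.getD i PySem.Dict.empty).getD j 0 + 1))) a b =
            if a = i + nj ∧ b = nj then some (w + 1) else cellA d a b := by
        intro a b
        unfold cellA
        rw [PySem.Dict.getD_insert]
        by_cases ha : a = i + nj
        · rw [if_pos ha, PySem.Dict.get?_insert]
          by_cases hb : b = nj
          · rw [if_pos hb, if_pos ⟨ha, hb⟩, hcand]
          · rw [if_neg hb, if_neg (fun h => hb h.2), ha]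
        · rw [if_neg ha, if_neg (fun h => ha h.1)]
      have hins1 : (d.insert (i+nj) ((d.getD (i+nj) PySem.Dict.empty).insert nj
          ((d.getD i PySem.Dict.empty).getD j 0 + 1))).get? i = some m := by
        rw [PySem.Dict.get?_insert, if_neg hni, hm]
      have hins2 : Wf2 (d.insert (i+nj) ((d.getD (i+nj) PySem.Dict.empty).insert nj
          ((d.getD i PySem.Dict.empty).getD j 0 + 1))) := by
        intro a ma hma
        rw [PySem.Dict.get?_insert] at hma
        by_cases ha : a = i + nj
        · rw [if_pos ha] at hma
          have hma' := (Option.some.inj hma).symm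
          subst hma'
          refine ⟨⟨nj, ?_⟩, PySem.Dict.nodup_keys_insert _ _ _ hnodup⟩
          rw [PySem.Dict.get?_insert_self]; simp
        · rw [if_neg ha] at hma
          exact hC a ma hma
      cases hold : (d.getD (i+nj) PySem.Dict.empty).get? nj with
      | none =>
          dsimp only
          refine ⟨hins1, hins2, fun a b => ?_⟩
          rw [hins a b]
          by_cases he : a = i + nj ∧ b = nj
          · rw [if_pos he, if_pos ⟨he.1, he.2, by omega, he.1 ▸ hle, he.1 ▸ hnb⟩]
            have hcd : cellA d a b = none := by unfold cellA; rw [he.1, he.2, hold]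
            rw [hcd]
            rfl
          · rw [if_neg he, if_neg (fun h => he ⟨h.1, h.2.1⟩)]
      | some old =>
          dsimp only
          by_cases hlt : (d.getD i PySem.Dict.empty).getD j 0 + 1 < old
          · rw [if_pos hlt]
            refine ⟨hins1, hins2, fun a b => ?_⟩
            rw [hins a b]
            by_cases he : a = i + nj ∧ b = nj
            · rw [if_pos he, if_pos ⟨he.1, he.2, by omega, he.1 ▸ hle, he.1 ▸ hnb⟩]
              have hcd : cellA d a b = some old := by unfold cellA; rw [he.1, he.2, hold]
              rw [hcd]
              show some (w+1) = some (min old (w+1))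
              rw [hcand] at hlt
              rw [min_eq_right (le_of_lt hlt)]
            · rw [if_neg he, if_neg (fun h => he ⟨h.1, h.2.1⟩)]
          · rw [if_neg hlt]
            refine ⟨hm, hC, fun a b => ?_⟩
            by_cases he : a = i + nj ∧ b = nj
            · rw [if_pos ⟨he.1, he.2, by omega, he.1 ▸ hle, he.1 ▸ hnb⟩]
              have hcd : cellA d a b = some old := by unfold cellA; rw [he.1, he.2, hold]
              rw [hcd]
              show some old = some (min old (w+1))
              rw [hcand] at hlt
              rw [min_eq_left (by omega)]
            · rw [if_neg (fun h => he ⟨h.1, h.2.1⟩)]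

lemma upd3_cells (N : Int) (B : List Int) (i j w : Int)
    (d : PySem.Dict Int (PySem.Dict Int Int)) (m : PySem.Dict Int Int)
    (hm : d.get? i = some m) (hw : m.getD j 0 = w) (hC : Wf2 d) :
    (([j-1, j, j+1] : List Int).foldl (updA N B i j) d).get? i = some m ∧
    Wf2 (([j-1, j, j+1] : List Int).foldl (updA N B i j) d) ∧
    (∀ a b : Int, cellA (([j-1, j, j+1] : List Int).foldl (updA N B i j) d) a b =
      if a = i + b ∧ (b = j-1 ∨ b = j ∨ b = j+1) ∧ 1 ≤ b ∧ a ≤ N ∧ B.contains a = false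
      then optMin (cellA d a b) (some (w + 1)) else cellA d a b) := by
  obtain ⟨h11, h12, h13⟩ := updA_cells N B i j w d m hm hw hC (j-1)
  obtain ⟨h21, h22, h23⟩ := updA_cells N B i j w _ m h11 hw h12 j
  obtain ⟨h31, h32, h33⟩ := updA_cells N B i j w _ m h21 hw h22 (j+1)
  rw [List.foldl_cons, List.foldl_cons, List.foldl_cons, List.foldl_nil]
  refine ⟨h31, h32, fun a b => ?_⟩
  rw [h33 a b, h23 a b, h13 a b]
  by_cases hco : a = i + b ∧ (b = j-1 ∨ b = j ∨ b = j+1) ∧ 1 ≤ b ∧ a ≤ N ∧ B.contains a = false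
  · rw [if_pos hco]
    obtain ⟨ha, hb, h1b, hN, hB⟩ := hco
    rcases hb with rfl | rfl | rfl
    · rw [if_neg (by rintro ⟨-, h, -⟩; omega), if_neg (by rintro ⟨-, h, -⟩; omega),
        if_pos ⟨by omega, rfl, h1b, hN, hB⟩]
    · rw [if_neg (by rintro ⟨-, h, -⟩; omega), if_pos ⟨by omega, rfl, h1b, hN, hB⟩,
        if_neg (by rintro ⟨-, h, -⟩; omega)]
    · rw [if_pos ⟨by omega, rfl, h1b, hN, hB⟩, if_neg (by rintro ⟨-, h, -⟩; omega),
        if_neg (by rintro ⟨-, h, -⟩; omega)]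
  · have hn1 : ¬ (a = i + (j-1) ∧ b = j-1 ∧ 1 ≤ j-1 ∧ a ≤ N ∧ B.contains a = false) := by
      rintro ⟨ha, rfl, h1, hN, hB⟩
      exact hco ⟨by omega, Or.inl rfl, h1, hN, hB⟩
    have hn2 : ¬ (a = i + j ∧ b = j ∧ 1 ≤ j ∧ a ≤ N ∧ B.contains a = false) := by
      rintro ⟨ha, rfl, h1, hN, hB⟩
      exact hco ⟨by omega, Or.inr (Or.inl rfl), h1, hN, hB⟩
    have hn3 : ¬ (a = i + (j+1) ∧ b = j+1 ∧ 1 ≤ j+1 ∧ a ≤ N ∧ B.contains a = false) := by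
      rintro ⟨ha, rfl, h1, hN, hB⟩
      exact hco ⟨by omega, Or.inr (Or.inr rfl), h1, hN, hB⟩
    rw [if_neg hco, if_neg hn3, if_neg hn2, if_neg hn1]

lemma outerA_cells (N : Int) (B : List Int) (i : Int) (m : PySem.Dict Int Int)
    (hmv : ∀ q, m.get? q = fS B i q) :
    ∀ (ks : List Int) (d : PySem.Dict Int (PySem.Dict Int Int)),
    d.get? i = some m → Wf2 d →
    (∀ q ∈ ks, fS B i q ≠ none) →
    ((ks.foldl (fun dp j => ([j-1, j, j+1] : List Int).foldl (updA N B i j) dp) d).get? i = some m ∧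
     Wf2 (ks.foldl (fun dp j => ([j-1, j, j+1] : List Int).foldl (updA N B i j) dp) d) ∧
     (∀ a b : Int, cellA (ks.foldl (fun dp j => ([j-1, j, j+1] : List Int).foldl (updA N B i j) dp) d) a b =
       if a = i + b ∧ 1 ≤ b ∧ a ≤ N ∧ B.contains a = false
       then ks.foldl (fun acc q => if q = b-1 ∨ q = b ∨ q = b+1
           then optMin acc ((fS B i q).map (· + 1)) else acc) (cellA d a b)
       else cellA d a b)) := by
  intro ks
  induction ks with
  | nil =>
      intro d hm hC _
      refine ⟨hm, hC, fun a b => ?_⟩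
      rw [List.foldl_nil]
      split_ifs <;> rfl
  | cons j ks ih =>
      intro d hm hC hkv
      obtain ⟨wv, hwv⟩ := Option.ne_none_iff_exists'.mp (hkv j List.mem_cons_self)
      have hw : m.getD j 0 = wv := by
        rw [PySem.Dict.getD_eq_get?_getD, hmv j, hwv]; rfl
      obtain ⟨h1, h2, h3⟩ := upd3_cells N B i j wv d m hm hw hC
      rw [List.foldl_cons]
      obtain ⟨g1, g2, g3⟩ := ih _ h1 h2 (fun q hq => hkv q (List.mem_cons_of_mem j hq))
      refine ⟨g1, g2, fun a b => ?_⟩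
      rw [g3 a b]
      by_cases hco : a = i + b ∧ 1 ≤ b ∧ a ≤ N ∧ B.contains a = false
      · rw [if_pos hco, if_pos hco]
        conv_rhs => rw [List.foldl_cons]
        congr 1
        rw [h3 a b]
        obtain ⟨ha, h1b, hN, hB⟩ := hco
        by_cases hwin : j = b-1 ∨ j = b ∨ j = b+1
        · rw [if_pos ⟨ha, by omega, h1b, hN, hB⟩, if_pos hwin, hwv]
          rfl
        · rw [if_neg (by rintro ⟨-, h, -⟩; omega), if_neg hwin]
      · rw [if_neg hco, h3 a b, if_neg (by rintro ⟨ha, hwb, h1, hN, hB⟩; exact hco ⟨ha, h1, hN, hB⟩), if_neg hco]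

lemma relax_off (N : Int) (B : List Int) (i a b : Int)
    (hoff : ¬(a = i + b ∧ 1 ≤ b ∧ a ≤ N ∧ B.contains a = false) ∨ B.contains i = true ∨
      (∀ q : Int, fS B i q = none)) :
    relax N B (i-1) a b = relax N B i a b := by
  unfold relax
  by_cases hs : a = 2 ∧ b = 1
  · rw [if_pos hs, if_pos hs]
  · rw [if_neg hs, if_neg hs]
    by_cases hpi : a - b = i
    · rw [if_neg (by rintro ⟨-, -, -, -, h5, -⟩; omega)]
      by_cases hc : 1 ≤ b ∧ a ≤ N ∧ B.contains a = false ∧ 2 ≤ a - b ∧ a - b ≤ i ∧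
          B.contains (a-b) = false
      · rw [if_pos hc]
        obtain ⟨hb1, haN, haB, hp2, hpk, hpB⟩ := hc
        rcases hoff with hoff | hoff | hoff
        · exact absurd ⟨by omega, hb1, haN, haB⟩ hoff
        · rw [hpi, hoff] at hpB; simp at hpB
        · have hmn : min3 B (a-b) b = none := by
            unfold min3
            rw [hpi, hoff (b-1), hoff b, hoff (b+1)]
            rfl
          rw [hmn]; rfl
      · rw [if_neg hc]
    · have hiff : (1 ≤ b ∧ a ≤ N ∧ B.contains a = false ∧ 2 ≤ a-b ∧ a-b ≤ i-1 ∧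
          B.contains (a-b) = false) ↔ (1 ≤ b ∧ a ≤ N ∧ B.contains a = false ∧ 2 ≤ a-b ∧
          a-b ≤ i ∧ B.contains (a-b) = false) := by
        constructor
        · rintro ⟨x1,x2,x3,x4,x5,x6⟩; exact ⟨x1,x2,x3,x4, by omega, x6⟩
        · rintro ⟨x1,x2,x3,x4,x5,x6⟩; exact ⟨x1,x2,x3,x4, by omega, x6⟩
      rw [if_congr hiff rfl rfl]

lemma stepA_inv (N : Int) (B : List Int) (i : Int) (d : PySem.Dict Int (PySem.Dict Int Int))
    (h2 : 2 ≤ i) (hiN : i ≤ N) (h : InvA N B (i-1) d) : InvA N B i (stepA N B d i) := by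
  obtain ⟨hcells, hwf⟩ := h
  rw [stepA_eq]
  cases hbi : B.contains i with
  | true =>
      rw [if_pos (by simp : ((true || !d.contains i) = true))]
      refine ⟨fun a b => ?_, hwf⟩
      rw [hcells a b]
      exact relax_off N B i a b (Or.inr (Or.inl hbi))
  | false =>
      cases hdi : d.contains i with
      | false =>
          rw [if_pos (by simp : ((false || !false) = true))]
          have hnone : ∀ q : Int, fS B i q = none := by
            intro q
            have hce : cellA d i q = none := by
              unfold cellA
              rw [PySem.Dict.getD_of_not_contains, PySem.Dict.get?_empty]
              exact hdi
            calc fS B i q = relax N B (i-1) i q := (relax_eq_fS N B (i-1) i q (by omega) hiN).symm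
              _ = cellA d i q := (hcells i q).symm
              _ = none := hce
          refine ⟨fun a b => ?_, hwf⟩
          rw [hcells a b]
          exact relax_off N B i a b (Or.inr (Or.inr hnone))
      | true =>
          rw [if_neg (by decide)]
          have hisome : (d.get? i).isSome = true := by
            rw [← PySem.Dict.contains_eq_isSome_get?]; exact hdi
          obtain ⟨m, hm⟩ := Option.isSome_iff_exists.mp hisome
          have hgdm : d.getD i PySem.Dict.empty = m := by
            rw [PySem.Dict.getD_eq_get?_getD, hm]; rfl
          have hmv : ∀ q, m.get? q = fS B i q := by
            intro q
            have hq := hcells i q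
            unfold cellA at hq
            rw [hgdm] at hq
            rw [hq, relax_eq_fS N B (i-1) i q (by omega) hiN]
          have hkv : ∀ q ∈ m.keys, fS B i q ≠ none := by
            intro q hq hn
            rw [← hmv q] at hn
            exact ((PySem.Dict.get?_eq_none_iff_not_mem_keys _ _).mp hn) hq
          obtain ⟨f1, f2, f3⟩ := outerA_cells N B i m hmv m.keys d hm hwf hkv
          rw [hgdm]
          refine ⟨fun a b => ?_, f2⟩
          rw [f3 a b]
          by_cases hco : a = i + b ∧ 1 ≤ b ∧ a ≤ N ∧ B.contains a = false
          · rw [if_pos hco]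
            obtain ⟨ha, h1b, hN, hB⟩ := hco
            have hstart : cellA d a b = none := by
              rw [hcells a b]
              unfold relax
              rw [if_neg (by rintro ⟨ha2, hb1⟩; omega),
                if_neg (by rintro ⟨-, -, -, -, h5, -⟩; omega)]
            rw [hstart]
            -- both sides are minima of the same candidate set
            have hrhs : relax N B i a b = (min3 B i b).map (· + 1) := by
              unfold relax
              rw [if_neg (by rintro ⟨ha2, hb1⟩; omega),
                if_pos ⟨h1b, hN, hB, by omega, by omega, by rw [show a - b = i by omega]; exact hbi⟩,
                show a - b = i by omega]
            rw [hrhs]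
            rw [PySem.List.foldl_ite_eq_foldl_filter]
            have hL := isMinOf_foldl (fun q => (fS B i q).map (· + 1))
              (m.keys.filter (fun q => decide (q = b-1 ∨ q = b ∨ q = b+1))) none
              (fun _ => False) (fun v hv => hv.elim)
            have hR := isMinOf_map_add (isMinOf_min3 B i b)
            refine IsMinOf.unique (IsMinOf.congr (fun v => ?_) hL) hR
            constructor
            · rintro (hv | ⟨q, hqmem, hqv⟩)
              · exact hv.elim
              · rw [List.mem_filter] at hqmem
                obtain ⟨w, hw, hwv⟩ := Option.map_eq_some_iff.mp hqv
                refine ⟨q, of_decide_eq_true hqmem.2, ?_⟩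
                rw [hw]
                congr 1
                omega
            · rintro ⟨q, hwin, hfq⟩
              refine Or.inr ⟨q, ?_, ?_⟩
              · rw [List.mem_filter]
                refine ⟨?_, decide_eq_true hwin⟩
                have : m.get? q ≠ none := by rw [hmv q, hfq]; simp
                by_contra hmem
                exact this ((PySem.Dict.get?_eq_none_iff_not_mem_keys _ _).mpr hmem)
              · show (fun q => Option.map (fun x => x + 1) (fS B i q)) q = some v
                simp only []
                rw [hfq]
                show some (v - 1 + 1) = some v
                congr 1
                omega
          · rw [if_neg hco, hcells a b]
            exact relax_off N B i a b (Or.inl hco)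

lemma foldA_inv (N : Int) (B : List Int) (hN : 2 ≤ N) :
    InvA N B N ((PySem.List.pyRange 2 (N+1) 1).foldl (stepA N B) dpA0) := by
  have main : ∀ k : Int, 1 ≤ k → k ≤ N →
      InvA N B k ((PySem.List.pyRange 2 (k+1) 1).foldl (stepA N B) dpA0) := by
    intro k hk
    induction k, hk using Int.le_induction with
    | base =>
        intro _
        rw [PySem.List.pyRange_one_eq_nil (by omega)]
        exact invA_base N B
    | succ k hk ih =>
        intro hkN
        rw [PySem.List.pyRange_one_succ_right (by omega), List.foldl_append, List.foldl_cons,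
          List.foldl_nil]
        have := stepA_inv N B (k+1) _ (by omega) hkN (by simpa using ih (by omega))
        simpa using this
  exact main N (by omega) le_rfl

-- ---------- B side ----------

def tblB0 : PySem.Dict (Int × Int) Int := PySem.Dict.empty.insert ((2 : Int), (1 : Int)) (1 : Int)

def stepB (banned : List Int) (st : PySem.Dict (Int × Int) Int × Int × Int) (i : Int) :
    PySem.Dict (Int × Int) Int × Int × Int :=
  let bs : PySem.Set Int := PySem.Set.ofList banned
  let tbl := st.1
  let jmax := if PySem.Int.floordiv ((st.2.1+1)*(st.2.1+2)) 2 + 1 ≤ i then st.2.1 + 1 else st.2.1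
  let hi := st.2.2
  if bs.contains i || decide (st.2.2 < i - jmax) then (tbl, jmax, hi)
  else
    let res := (PySem.List.pyRange 1 (jmax+1) 1).foldl
      (fun (acc : PySem.Dict (Int × Int) Int × Int) j =>
        let tbl := acc.1
        let p := i - j
        if p < 2 || bs.contains p then acc
        else
          let best := ([j-1, j, j+1] : List Int).foldl (fun best q =>
              match tbl.get? (p, q) with
              | none => best
              | some v => match best with
                | none => some v
                | some b => if v < b then some v else best) none
          match best with
          | none => acc
          | some b => (tbl.insert (i, j) (b + 1), i)) (tbl, hi)
    (res.1, jmax, res.2)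

def InvB (B : List Int) (k : Int) (st : PySem.Dict (Int × Int) Int × Int × Int) : Prop :=
  (∀ i j, st.1.get? (i,j) = if (i = 2 ∧ j = 1) ∨ (3 ≤ i ∧ i ≤ k) then fS B i j else none) ∧
  (1 ≤ st.2.1 ∧ st.2.1*(st.2.1+1) + 2 ≤ 2*k ∧ 2*k < (st.2.1+1)*(st.2.1+2) + 2) ∧
  (∀ p q : Int, st.2.2 < p → p ≤ k → fS B p q = none)

lemma invB_base (B : List Int) : InvB B 2 (tblB0, 1, 2) := by
  refine ⟨?_, by norm_num, fun p q h1 h2 => absurd (show (2:Int) < p from h1) (by omega)⟩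
  intro i j
  unfold tblB0
  rw [PySem.Dict.get?_insert]
  by_cases hs : i = 2 ∧ j = 1
  · rcases hs with ⟨rfl, rfl⟩
    rw [if_pos rfl]
    rw [if_pos (Or.inl ⟨rfl, rfl⟩), fS_seed]
  · have hne : (i, j) ≠ ((2 : Int), (1 : Int)) := by
      intro he
      exact hs ⟨congrArg Prod.fst he, congrArg Prod.snd he⟩
    rw [if_neg hne, PySem.Dict.get?_empty]
    rw [if_neg]
    rintro (h | h)
    · exact hs h
    · omega


lemma bsmem (B : List Int) (x : Int) : (PySem.Set.ofList B).contains x = B.contains x := by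
  by_cases hx : x ∈ B
  · rw [(PySem.Set.contains_iff _ _).mpr ((PySem.Set.mem_ofList _ _).mpr hx)]
    exact (List.contains_iff_mem.mpr hx).symm
  · have h1 : ¬ (PySem.Set.ofList B).contains x = true :=
      fun h => hx ((PySem.Set.mem_ofList _ _).mp ((PySem.Set.contains_iff _ _).mp h))
    have h2 : ¬ B.contains x = true := fun h => hx (List.contains_iff_mem.mp h)
    rw [Bool.not_eq_true] at h1 h2
    rw [h1, h2]

lemma tri_bridge (x i : Int) (hx : Even x) : (PySem.Int.floordiv x 2 + 1 ≤ i) ↔ (x + 2 ≤ 2*i) := by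
  rw [PySem.Int.floordiv_eq_ediv_of_pos (by norm_num)]
  obtain ⟨r, hr⟩ := hx
  subst hr; omega

lemma even_mul_add (a : Int) : Even ((a+1)*(a+2)) := by
  have h := Int.even_mul_succ_self (a+1)
  have e : (a+1)*(a+1+1) = (a+1)*(a+2) := by ring
  rwa [e] at h

lemma fS_nonpos (B : List Int) (i j : Int) (hj : j ≤ 0) : fS B i j = none := by
  rw [fS_def]
  split_ifs with h1 h2 h3
  · exfalso; omega
  · rfl
  · exact absurd h3.1 (by omega)
  · rfl

lemma fS_low (B : List Int) (i j : Int) (hs : ¬ (i = 2 ∧ j = 1)) (hle : i ≤ 2) :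
    fS B i j = none := by
  rw [fS_def, if_pos hle, if_neg hs]

lemma fS_banned (B : List Int) (i j : Int) (h3 : 3 ≤ i) (hb : B.contains i = true) :
    fS B i j = none := by
  rw [fS_def, if_neg (by omega)]
  rw [if_neg]
  rintro ⟨-, hc, -⟩
  rw [hb] at hc
  simp at hc

/-- row update of B's pull DP, as a named function (definitionally the inner loop of `stepB`). -/
def rowStep (B : List Int) (i : Int) (acc : PySem.Dict (Int × Int) Int × Int) (j : Int) :
    PySem.Dict (Int × Int) Int × Int :=
  if i - j < 2 || (PySem.Set.ofList B).contains (i - j) then acc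
  else
    match ([j-1, j, j+1] : List Int).foldl (fun best q =>
        match acc.1.get? (i - j, q) with
        | none => best
        | some v => match best with
          | none => some v
          | some b => if v < b then some v else best) none with
    | none => acc
    | some b => (acc.1.insert (i, j) (b + 1), i)

lemma stepB_eq (B : List Int) (st : PySem.Dict (Int × Int) Int × Int × Int) (i : Int) :
    stepB B st i =
      (let jmax := if PySem.Int.floordiv ((st.2.1+1)*(st.2.1+2)) 2 + 1 ≤ i then st.2.1 + 1 else st.2.1
       if (PySem.Set.ofList B).contains i || decide (st.2.2 < i - jmax) then (st.1, jmax, st.2.2)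
       else
         let res := (PySem.List.pyRange 1 (jmax+1) 1).foldl (rowStep B i) (st.1, st.2.2)
         (res.1, jmax, res.2)) := rfl

lemma rowStep_cells (B : List Int) (i j : Int) (acc : PySem.Dict (Int × Int) Int × Int)
    (h3 : 3 ≤ i) (hbi : B.contains i = false) (hj : 1 ≤ j)
    (hprev : ∀ p q : Int, p ≤ i - 1 → acc.1.get? (p,q) = fS B p q)
    (hcur : ∀ q : Int, acc.1.get? (i,q) = none ∨ acc.1.get? (i,q) = fS B i q) :
    (∀ i' j' : Int, (rowStep B i acc j).1.get? (i',j') =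
      if i' = i ∧ j' = j then fS B i j else acc.1.get? (i',j')) ∧
    (rowStep B i acc j).2 = (if fS B i j = none then acc.2 else i) := by
  unfold rowStep
  rw [bsmem]
  have hcurj : acc.1.get? (i, j) = none ∨ acc.1.get? (i,j) = fS B i j := hcur j
  by_cases hg : (i - j < 2) ∨ B.contains (i - j) = true
  · -- guard fires: nothing is written, and fS B i j = none
    have hgb : (decide (i - j < 2) || B.contains (i - j)) = true := by
      rcases hg with h | h
      · rw [decide_eq_true h]; rfl
      · rw [h, Bool.or_true]
    rw [if_pos hgb]
    have hfS : fS B i j = none := by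
      rw [fS_def, if_neg (by omega), if_neg]
      rintro ⟨-, -, hp, hc⟩
      rcases hg with h | h
      · omega
      · rw [h] at hc; simp at hc
    refine ⟨fun i' j' => ?_, by rw [if_pos hfS]⟩
    by_cases he : i' = i ∧ j' = j
    · rcases he with ⟨rfl, rfl⟩
      rw [if_pos ⟨rfl, rfl⟩, hfS]
      rcases hcurj with h | h
      · exact h
      · rw [h, hfS]
    · rw [if_neg he]
  · -- guard does not fire: the three-way min is min3 and the cell gets fS B i j
    push_neg at hg
    obtain ⟨hp2, hcp'⟩ := hg
    have hcp : B.contains (i - j) = false := by simpa using hcp'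
    have hgb : (decide (i - j < 2) || B.contains (i - j)) = false := by
      rw [decide_eq_false (by omega : ¬ (i - j < 2)), hcp]; rfl
    rw [if_neg (by rw [hgb]; simp)]
    have hbest : ([j-1, j, j+1] : List Int).foldl (fun best q =>
        match acc.1.get? (i - j, q) with
        | none => best
        | some v => match best with
          | none => some v
          | some b => if v < b then some v else best) none = min3 B (i-j) j := by
      simp only [List.foldl_cons, List.foldl_nil, matchStep_eq]
      rw [hprev (i-j) (j-1) (by omega), hprev (i-j) j (by omega), hprev (i-j) (j+1) (by omega)]
      rfl
    have hfS : fS B i j = (min3 B (i-j) j).map (· + 1) := by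
      rw [fS_def, if_neg (by omega), if_pos ⟨hj, hbi, by omega, hcp⟩]
    rw [hbest]
    cases hm : min3 B (i-j) j with
    | none =>
        have hfS' : fS B i j = none := by rw [hfS, hm]; rfl
        refine ⟨fun i' j' => ?_, by rw [if_pos hfS']⟩
        by_cases he : i' = i ∧ j' = j
        · rcases he with ⟨rfl, rfl⟩
          rw [if_pos ⟨rfl, rfl⟩, hfS']
          rcases hcurj with h | h
          · exact h
          · rw [h, hfS']
        · rw [if_neg he]
    | some b =>
        have hfS' : fS B i j = some (b + 1) := by rw [hfS, hm]; rfl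
        refine ⟨fun i' j' => ?_, by rw [if_neg (by rw [hfS']; simp)]⟩
        show (acc.1.insert (i, j) (b+1)).get? (i', j') = _
        rw [PySem.Dict.get?_insert]
        by_cases he : i' = i ∧ j' = j
        · rcases he with ⟨rfl, rfl⟩
          rw [if_pos rfl, if_pos ⟨rfl, rfl⟩, hfS']
        · have hne : (i', j') ≠ (i, j) := by
            intro hc
            exact he ⟨congrArg Prod.fst hc, congrArg Prod.snd hc⟩
          rw [if_neg hne, if_neg he]

lemma rowFold_cells (B : List Int) (i : Int) (h3 : 3 ≤ i) (hbi : B.contains i = false) :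
    ∀ (js : List Int) (acc : PySem.Dict (Int × Int) Int × Int),
    (∀ j ∈ js, (1:Int) ≤ j) →
    (∀ p q : Int, p ≤ i - 1 → acc.1.get? (p,q) = fS B p q) →
    (∀ q : Int, acc.1.get? (i,q) = none ∨ acc.1.get? (i,q) = fS B i q) →
    (∀ i' j' : Int, (js.foldl (rowStep B i) acc).1.get? (i',j') =
      if i' = i ∧ j' ∈ js then fS B i j' else acc.1.get? (i',j')) ∧
    (((js.foldl (rowStep B i) acc).2 = acc.2 ∧ ∀ j ∈ js, fS B i j = none) ∨
      (js.foldl (rowStep B i) acc).2 = i) := by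
  intro js
  induction js with
  | nil =>
      intro acc _ _ _
      exact ⟨fun i' j' => by simp, Or.inl ⟨rfl, by simp⟩⟩
  | cons j js ih =>
      intro acc hjs hprev hcur
      rw [List.foldl_cons]
      obtain ⟨hc, hsnd1⟩ := rowStep_cells B i j acc h3 hbi (hjs j (List.mem_cons_self)) hprev hcur
      have hprev' : ∀ p q : Int, p ≤ i - 1 → (rowStep B i acc j).1.get? (p,q) = fS B p q := by
        intro p q hp
        rw [hc p q, if_neg]
        · exact hprev p q hp
        · rintro ⟨rfl, -⟩; omega
      have hcur' : ∀ q : Int, (rowStep B i acc j).1.get? (i,q) = none ∨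
          (rowStep B i acc j).1.get? (i,q) = fS B i q := by
        intro q
        rw [hc i q]
        by_cases hq : q = j
        · subst hq; rw [if_pos ⟨rfl, rfl⟩]; right; rfl
        · rw [if_neg (fun h => hq h.2)]; exact hcur q
      obtain ⟨gcells, gsnd⟩ := ih (rowStep B i acc j)
        (fun x hx => hjs x (List.mem_cons_of_mem j hx)) hprev' hcur'
      constructor
      · intro i' j'
        rw [gcells i' j']
        by_cases hii : i' = i
        · subst hii
          by_cases hjs' : j' ∈ js
          · rw [if_pos ⟨rfl, hjs'⟩, if_pos ⟨rfl, List.mem_cons_of_mem j hjs'⟩]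
          · rw [if_neg (fun h => hjs' h.2), hc]
            by_cases hjj : j' = j
            · subst hjj
              rw [if_pos ⟨rfl, rfl⟩, if_pos ⟨rfl, List.mem_cons_self⟩]
            · rw [if_neg (fun h => hjj h.2),
                if_neg (fun h => (List.mem_cons.mp h.2).elim hjj hjs')]
        · rw [if_neg (fun h => hii h.1), hc, if_neg (fun h => hii h.1),
            if_neg (fun h => hii h.1)]
      · by_cases hf : fS B i j = none
        · rw [if_pos hf] at hsnd1
          rcases gsnd with ⟨heq, hall⟩ | hi'
          · left
            refine ⟨by rw [heq, hsnd1], ?_⟩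
            intro x hx
            rcases List.mem_cons.mp hx with rfl | hx'
            · exact hf
            · exact hall x hx'
          · right; exact hi'
        · rw [if_neg hf] at hsnd1
          rcases gsnd with ⟨heq, hall⟩ | hi'
          · right; rw [heq, hsnd1]
          · right; exact hi'

lemma fS_dead (B : List Int) (i j : Int) (h3 : 3 ≤ i)
    (hdead : ∀ q : Int, fS B (i-j) q = none) : fS B i j = none := by
  rw [fS_def, if_neg (by omega)]
  split_ifs with hc
  · have hmn : min3 B (i-j) j = none := by
      unfold min3
      rw [hdead (j-1), hdead j, hdead (j+1)]
      rfl
    rw [hmn]; rfl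
  · rfl

lemma stepB_inv (B : List Int) (i : Int) (st : PySem.Dict (Int × Int) Int × Int × Int)
    (h3 : 3 ≤ i) (h : InvB B (i-1) st) : InvB B i (stepB B st i) := by
  obtain ⟨hget, ⟨hjm1, hjm2, hjm3⟩, hC3⟩ := h
  rw [stepB_eq]
  set jm := st.2.1 with hjmdef
  set hi := st.2.2 with hhidef
  -- the updated jmax and its characterisation at i
  set jm' := if PySem.Int.floordiv ((jm+1)*(jm+2)) 2 + 1 ≤ i then jm + 1 else jm with hjm'
  have hjmc : 1 ≤ jm' ∧ jm'*(jm'+1) + 2 ≤ 2*i ∧ 2*i < (jm'+1)*(jm'+2) + 2 := by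
    rw [hjm']
    split_ifs with hb
    · rw [tri_bridge _ i (even_mul_add jm)] at hb
      have e : (jm+1+1)*(jm+1+2) = (jm+1)*(jm+2) + 2*(jm+2) := by ring
      refine ⟨by omega, by linarith [hb], by linarith⟩
    · rw [tri_bridge _ i (even_mul_add jm)] at hb
      push_neg at hb
      exact ⟨hjm1, by linarith, by linarith⟩
  have hprev : ∀ p q : Int, p ≤ i - 1 → st.1.get? (p,q) = fS B p q := by
    intro p q hp
    rw [hget p q]
    split_ifs with hcond
    · rfl
    · push_neg at hcond
      by_cases hp2 : p = 2
      · subst hp2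
        have hq1 : q ≠ 1 := hcond.1 rfl
        rw [fS_two B q hq1]
      · by_cases hp3 : 3 ≤ p
        · exact absurd (hcond.2 hp3) (by omega)
        · rw [fS_low B p q (fun hx => hp2 hx.1) (by omega)]
  have hcur : ∀ q : Int, st.1.get? (i,q) = none ∨ st.1.get? (i,q) = fS B i q := by
    intro q
    left
    rw [hget i q, if_neg]
    rintro (⟨rfl, -⟩ | ⟨-, hle⟩) <;> omega
  have hext : ∀ i' j' : Int, i' ≠ i →
      (if (i' = 2 ∧ j' = 1) ∨ (3 ≤ i' ∧ i' ≤ i - 1) then fS B i' j' else none) =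
      (if (i' = 2 ∧ j' = 1) ∨ (3 ≤ i' ∧ i' ≤ i) then fS B i' j' else none) := by
    intro i' j' hii
    have hiff : ((i' = 2 ∧ j' = 1) ∨ (3 ≤ i' ∧ i' ≤ i - 1)) ↔
        ((i' = 2 ∧ j' = 1) ∨ (3 ≤ i' ∧ i' ≤ i)) := by
      constructor
      · rintro (h | h)
        · exact Or.inl h
        · exact Or.inr ⟨h.1, by omega⟩
      · rintro (h | h)
        · exact Or.inl h
        · exact Or.inr ⟨h.1, by omega⟩
    rw [if_congr hiff rfl rfl]
  have htri : ∀ j' : Int, jm' < j' → fS B i j' = none := by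
    intro j' hup
    cases hF : fS B i j' with
    | none => rfl
    | some v =>
        exfalso
        have h1 := (fS_some_pos B i j' v hF).1
        have ht := fS_tri B i j' v hF
        have hmono : (jm'+1)*(jm'+2) ≤ j'*(j'+1) :=
          mul_le_mul (by omega) (by omega) (by omega) (by omega)
        linarith [hjmc.2.2]
  by_cases hbi : B.contains i = true
  · -- banned row: skip; fS is none on row i
    rw [if_pos (by rw [bsmem, hbi]; rfl)]
    refine ⟨?_, hjmc, ?_⟩
    · intro i' j'
      rw [hget i' j']
      by_cases hii : i' = i
      · subst hii
        rw [if_neg (by rintro (⟨rfl, -⟩ | ⟨-, hle⟩) <;> omega)]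
        rw [if_pos (Or.inr ⟨h3, le_refl i'⟩), fS_banned B i' j' h3 hbi]
      · exact hext i' j' hii
    · intro p q hp1 hp2
      by_cases hpi : p = i
      · subst hpi; exact fS_banned B p q h3 hbi
      · exact hC3 p q hp1 (by omega)
  · rw [Bool.not_eq_true] at hbi
    by_cases hskip : hi < i - jm'
    · -- unreachable row: skip; fS is none on row i via the dead predecessor window
      rw [if_pos (by rw [bsmem, hbi]; simpa using hskip)]
      have hrow : ∀ j' : Int, fS B i j' = none := by
        intro j'
        by_cases hj0 : j' ≤ 0
        · exact fS_nonpos B i j' hj0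
        · by_cases hup : jm' < j'
          · exact htri j' hup
          · refine fS_dead B i j' h3 ?_
            intro q
            exact hC3 (i - j') q (by omega) (by omega)
      refine ⟨?_, hjmc, ?_⟩
      · intro i' j'
        rw [hget i' j']
        by_cases hii : i' = i
        · subst hii
          rw [if_neg (by rintro (⟨rfl, -⟩ | ⟨-, hle⟩) <;> omega)]
          rw [if_pos (Or.inr ⟨h3, le_refl i'⟩), hrow j']
        · exact hext i' j' hii
      · intro p q hp1 hp2
        by_cases hpi : p = i
        · subst hpi; exact hrow q
        · exact hC3 p q hp1 (by omega)
    · -- process the row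
      rw [if_neg (by rw [bsmem, hbi]; simpa using hskip)]
      obtain ⟨hro, hsnd⟩ := rowFold_cells B i h3 hbi (PySem.List.pyRange 1 (jm'+1) 1) (st.1, hi)
        (fun j hjmem => ((PySem.List.mem_pyRange_one).mp hjmem).1) hprev hcur
      refine ⟨?_, hjmc, ?_⟩
      · intro i' j'
        rw [hro i' j']
        by_cases hii : i' = i
        · subst hii
          by_cases hjr : j' ∈ PySem.List.pyRange 1 (jm'+1) 1
          · rw [if_pos ⟨rfl, hjr⟩, if_pos (Or.inr ⟨h3, le_refl i'⟩)]
          · rw [if_neg (fun h => hjr h.2)]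
            have hnone : fS B i' j' = none := by
              rw [PySem.List.mem_pyRange_one] at hjr
              push_neg at hjr
              by_cases hj0 : j' ≤ 0
              · exact fS_nonpos B i' j' hj0
              · exact htri j' (by omega)
            rw [hnone]
            show st.1.get? (i', j') = _
            rw [hget i' j', if_neg (by rintro (⟨rfl, -⟩ | ⟨-, hle⟩) <;> omega)]
            split_ifs <;> rfl
        · rw [if_neg (fun h => hii h.1)]
          show st.1.get? (i', j') = _
          rw [hget i' j']
          exact hext i' j' hii
      · rcases hsnd with ⟨heq, hall⟩ | heq
        · rw [heq]
          show ∀ p q : Int, hi < p → p ≤ i → fS B p q = none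
          intro p q hp1 hp2
          by_cases hpi : p = i
          · subst hpi
            by_cases hj0 : q ≤ 0
            · exact fS_nonpos B p q hj0
            · by_cases hup : jm' < q
              · exact htri q hup
              · exact hall q ((PySem.List.mem_pyRange_one).mpr ⟨by omega, by omega⟩)
          · exact hC3 p q hp1 (by omega)
        · rw [heq]
          intro p q hp1 hp2
          exact absurd hp1 (by omega)

lemma foldB_inv (B : List Int) (N : Int) (hN : 2 ≤ N) :
    InvB B N ((PySem.List.pyRange 3 (N+1) 1).foldl (stepB B) (tblB0, 1, 2)) := by
  induction N, hN using Int.le_induction with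
  | base =>
      rw [PySem.List.pyRange_one_eq_nil (by omega)]
      exact invB_base B
  | succ k hk ih =>
      rw [PySem.List.pyRange_one_succ_right (by omega), List.foldl_append, List.foldl_cons,
        List.foldl_nil]
      have := stepB_inv B (k+1) _ (by omega) (by simpa using ih)
      simpa using this

-- ---------- final answers ----------

lemma solve_eq' (N : Int) (banned : List Int) :
    solve N banned =
      (if ((PySem.List.pyRange 2 (N+1) 1).foldl (stepA N banned) dpA0).contains N then
        match PySem.List.min?
            ((((PySem.List.pyRange 2 (N+1) 1).foldl (stepA N banned) dpA0)).getD N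
              PySem.Dict.empty).values (fun v => v) with
        | some v => v
        | none => 0
      else -1) := rfl

lemma solve_alt_eq' (N : Int) (banned : List Int) :
    solve_alt N banned =
      (match (PySem.List.pyRange 1
          (((PySem.List.pyRange 3 (N+1) 1).foldl (stepB banned) (tblB0, 1, 2)).2.1 + 1) 1).foldl
          (fun best j =>
            match ((PySem.List.pyRange 3 (N+1) 1).foldl (stepB banned) (tblB0, 1, 2)).1.get? (N, j) with
            | none => best
            | some v => match best with
              | none => some v
              | some b => if v < b then some v else best) none with
      | none => -1
      | some b => b) := rfl

lemma answer_eq (N : Int) (banned : List Int) (hN : 2 ≤ N) :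
    solve N banned = solve_alt N banned := by
  obtain ⟨hAc, hAwf⟩ := foldA_inv N banned hN
  obtain ⟨hBc, hBjm, hBc3⟩ := foldB_inv banned N hN
  rw [solve_eq', solve_alt_eq']
  set dA := (PySem.List.pyRange 2 (N+1) 1).foldl (stepA N banned) dpA0 with hdA
  set stB := (PySem.List.pyRange 3 (N+1) 1).foldl (stepB banned) (tblB0, 1, 2) with hstB
  have hA1 : ∀ j : Int, cellA dA N j = fS banned N j := fun j => by
    rw [hAc N j, relax_eq_fS N banned N N j (by omega) le_rfl]
  have hB1 : ∀ j : Int, stB.1.get? (N,j) = fS banned N j := by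
    intro j
    rw [hBc N j]
    by_cases hc : (N = 2 ∧ j = 1) ∨ (3 ≤ N ∧ N ≤ N)
    · rw [if_pos hc]
    · rw [if_neg hc]
      have h3' : ¬ (3 ≤ N) := fun h33 => hc (Or.inr ⟨h33, le_rfl⟩)
      have hN2 : N = 2 := by omega
      have hj1 : j ≠ 1 := fun hj => hc (Or.inl ⟨hN2, hj⟩)
      subst hN2
      exact (fS_two banned j hj1).symm
  set P : Int → Prop := fun v => ∃ q : Int, fS banned N q = some v with hP
  have hBstep : (PySem.List.pyRange 1 (stB.2.1+1) 1).foldl (fun best j =>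
      match stB.1.get? (N, j) with
      | none => best
      | some v => match best with
        | none => some v
        | some b => if v < b then some v else best) none
      = (PySem.List.pyRange 1 (stB.2.1+1) 1).foldl
          (fun best j => optMin best (stB.1.get? (N, j))) none := by
    apply PySem.List.foldl_congr_mem
    intro acc x _
    exact matchStep_eq acc _
  have hBmin : IsMinOf ((PySem.List.pyRange 1 (stB.2.1+1) 1).foldl
      (fun best j => optMin best (stB.1.get? (N, j))) none) P := by
    have h0 := isMinOf_foldl (fun j => stB.1.get? (N, j)) (PySem.List.pyRange 1 (stB.2.1+1) 1) none
      (fun _ => False) (fun v hv => hv.elim)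
    refine IsMinOf.congr (fun v => ?_) h0
    constructor
    · rintro (hv | ⟨q, hqmem, hq⟩)
      · exact hv.elim
      · have hq' : stB.1.get? (N, q) = some v := hq
        exact ⟨q, by rw [← hB1 q]; exact hq'⟩
    · rintro ⟨q, hq⟩
      refine Or.inr ⟨q, ?_, show stB.1.get? (N, q) = some v by rw [hB1 q]; exact hq⟩
      rw [PySem.List.mem_pyRange_one]
      obtain ⟨hq1, -⟩ := fS_some_pos banned N q _ hq
      refine ⟨hq1, ?_⟩
      by_contra hlt
      push_neg at hlt
      have ht := fS_tri banned N q _ hq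
      have hmono : (stB.2.1+1)*(stB.2.1+2) ≤ q*(q+1) :=
        mul_le_mul (by omega) (by omega) (by omega) (by omega)
      obtain ⟨hj1, hj2, hj3⟩ := hBjm
      linarith
  by_cases hAcon : dA.contains N = true
  · have hisome : (dA.get? N).isSome = true := by
      rw [← PySem.Dict.contains_eq_isSome_get?]; exact hAcon
    obtain ⟨m, hm⟩ := Option.isSome_iff_exists.mp hisome
    have hgdm : dA.getD N PySem.Dict.empty = m := by
      rw [PySem.Dict.getD_eq_get?_getD, hm]; rfl
    have hmv : ∀ q, m.get? q = fS banned N q := fun q => by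
      have hq := hA1 q
      unfold cellA at hq
      rw [hgdm] at hq
      exact hq
    have hnd : m.keys.Nodup := (hAwf N m hm).2
    have hveq : m.values = m.items.map (fun p => p.2) := rfl
    have hvmem : ∀ v : Int, v ∈ m.values ↔ P v := by
      intro v
      rw [hveq]
      constructor
      · intro hv
        obtain ⟨⟨q, v'⟩, hqv, hv'⟩ := List.mem_map.mp hv
        cases hv'
        exact ⟨q, by rw [← hmv q]; exact PySem.Dict.get?_of_mem_items _ hqv hnd⟩
      · rintro ⟨q, hq⟩
        have hgq : m.get? q = some v := by rw [hmv q]; exact hq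
        exact List.mem_map.mpr ⟨(q,v), PySem.Dict.mem_items_of_get?_eq_some _ hgq, rfl⟩
    cases hminv : PySem.List.min? m.values (fun v => v) with
    | none =>
        exfalso
        obtain ⟨b, hb⟩ := (hAwf N m hm).1
        obtain ⟨w, hw⟩ := Option.ne_none_iff_exists'.mp hb
        have hwmem : w ∈ m.values := by
          rw [hveq]
          exact List.mem_map.mpr ⟨(b,w), PySem.Dict.mem_items_of_get?_eq_some _ hw, rfl⟩
        rw [(PySem.List.min?_eq_none_iff m.values (fun v => v)).mp hminv] at hwmem
        simp at hwmem
    | some va =>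
        have hAmin : IsMinOf (some va) P :=
          ⟨(hvmem va).mp (PySem.List.min?_mem hminv),
           fun w hw => PySem.List.min?_isMin hminv w ((hvmem w).mpr hw)⟩
        rw [if_pos hAcon, hgdm, hminv, hBstep, ← IsMinOf.unique hAmin hBmin]
  · rw [if_neg hAcon, hBstep]
    have hnoP : ∀ v, ¬ P v := by
      rintro v ⟨q, hq⟩
      have hc := hA1 q
      rw [hq] at hc
      unfold cellA at hc
      have hgd : dA.getD N PySem.Dict.empty = PySem.Dict.empty := by
        apply PySem.Dict.getD_of_not_contains
        rwa [Bool.not_eq_true] at hAcon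
      rw [hgd, PySem.Dict.get?_empty] at hc
      simp at hc
    cases hbb : (PySem.List.pyRange 1 (stB.2.1+1) 1).foldl
        (fun best j => optMin best (stB.1.get? (N, j))) none with
    | some vb =>
        exfalso
        rw [hbb] at hBmin
        exact hnoP vb hBmin.1
    | none => rfl

lemma answer_small (N : Int) (banned : List Int) (hN : N < 2) :
    solve N banned = solve_alt N banned := by
  rw [solve_eq', solve_alt_eq']
  rw [PySem.List.pyRange_one_eq_nil (by omega : (N:Int)+1 ≤ 2),
    PySem.List.pyRange_one_eq_nil (by omega : (N:Int)+1 ≤ 3)]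
  simp only [List.foldl_nil]
  have hc : dpA0.contains N = false := by
    unfold dpA0
    rw [PySem.Dict.contains_insert, PySem.Dict.contains_empty, Bool.or_false,
      beq_eq_false_iff_ne]
    omega
  rw [hc]
  have hg : tblB0.get? (N, 1) = none := by
    unfold tblB0
    rw [PySem.Dict.get?_insert, if_neg (by
      intro he
      have := congrArg Prod.fst he
      simp at this
      omega), PySem.Dict.get?_empty]
  rw [show ((tblB0, (1:Int), (2:Int)) : PySem.Dict (Int × Int) Int × Int × Int).2.1 + 1 = 1 + 1 from rfl,
    PySem.List.pyRange_one_singleton, List.foldl_cons, List.foldl_nil, hg]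
  rfl

-- ===== VERDICT (by name: the statement is the Claim_ definition above) =====
theorem solve_spec : Claim_equal_solve := by
  intro N banned _
  unfold Spec_solve
  rcases lt_or_ge N 2 with h | h
  · exact answer_small N banned h
  · exact answer_eq N banned h
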